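-- pv_equiv track=rewrite | github.com/max01mald/Big_Data_Labs | Lab_4/answers/answer.py | delimit_str
-- ===== SOURCE A (Python) =====
-- all_states = ["ab", "ak", "ar", "az", "ca", "co", "ct", "de", "dc",
--               "fl", "ga", "hi", "id", "il", "in", "ia", "ks", "ky", "la",
--               "me", "md", "ma", "mi", "mn", "ms", "mo", "mt", "ne", "nv",
--               "nh", "nj", "nm", "ny", "nc", "nd", "oh", "ok", "or", "pa",
--               "pr", "ri", "sc", "sd", "tn", "tx", "ut", "vt", "va", "vi",
--               "wa", "wv", "wi", "wy", "al", "bc", "mb", "nb", "lb", "nf",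
--               "nt", "ns", "nu", "on", "qc", "sk", "yt", "dengl", "fraspm"]
--
-- def delimit_str(string):
-- 	i = 0
-- 	b = i
-- 	list = []
--
-- 	while i <= len(string):
-- 		if string[b:i] in all_states:
-- 			list.append(string[b:i])
-- 			b = i
-- 		i += 1
-- 	return(list)
-- ===== SOURCE B (Python) =====
-- all_states = ["ab", "ak", "ar", "az", "ca", "co", "ct", "de", "dc",
--               "fl", "ga", "hi", "id", "il", "in", "ia", "ks", "ky", "la",
--               "me", "md", "ma", "mi", "mn", "ms", "mo", "mt", "ne", "nv",
--               "nh", "nj", "nm", "ny", "nc", "nd", "oh", "ok", "or", "pa",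
--               "pr", "ri", "sc", "sd", "tn", "tx", "ut", "vt", "va", "vi",
--               "wa", "wv", "wi", "wy", "al", "bc", "mb", "nb", "lb", "nf",
--               "nt", "ns", "nu", "on", "qc", "sk", "yt", "dengl", "fraspm"]
--
-- # The only code lengths are 2, 5 ("dengl") and 6 ("fraspm"): probe them in
-- # increasing order at a single advancing position pointer (shortest match).
-- _TWO_LETTER = frozenset(s for s in all_states if len(s) == 2)
--
-- def delimit_str(string):
--     tokens = []
--     p = 0
--     n = len(string)
--     while p < n:
--         w = string[p:p + 2]
--         if w in _TWO_LETTER: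
--             tokens.append(w)
--             p += 2
--         elif string[p:p + 5] == "dengl":
--             tokens.append("dengl")
--             p += 5
--         elif string[p:p + 6] == "fraspm":
--             tokens.append("fraspm")
--             p += 6
--         else:
--             break
--     return tokens
-- ===== Notes on version B (the rewrite author's own statement) =====
-- stated objective: faster
-- what changed: Replaces A's growing-slice scan (index i creeping forward while every ever-longer prefix string[b:i] is sliced out and tested for membership in the 69-element list) by a single advancing position pointer that probes only the possible token lengths (2 via a frozenset lookup, then 5 for 'dengl', then 6 for 'fraspm'), so each position does O(1) work and no unbounded slices are copied.
import Mathlib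
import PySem

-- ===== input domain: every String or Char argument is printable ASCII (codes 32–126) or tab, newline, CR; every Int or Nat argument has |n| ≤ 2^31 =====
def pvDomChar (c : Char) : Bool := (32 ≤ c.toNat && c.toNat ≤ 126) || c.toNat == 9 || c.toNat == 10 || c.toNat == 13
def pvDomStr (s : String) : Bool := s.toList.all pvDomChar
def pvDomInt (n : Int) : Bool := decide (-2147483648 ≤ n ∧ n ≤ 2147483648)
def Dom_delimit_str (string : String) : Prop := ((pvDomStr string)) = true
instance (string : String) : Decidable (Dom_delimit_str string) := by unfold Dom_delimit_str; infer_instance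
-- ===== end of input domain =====

-- B replaces A's growing-slice scan with a position pointer probing the only token lengths (2/5/6); equal return values, proved below.

-- ===== PORT A =====
def allStates : List String := ["ab", "ak", "ar", "az", "ca", "co", "ct", "de", "dc",
  "fl", "ga", "hi", "id", "il", "in", "ia", "ks", "ky", "la",
  "me", "md", "ma", "mi", "mn", "ms", "mo", "mt", "ne", "nv",
  "nh", "nj", "nm", "ny", "nc", "nd", "oh", "ok", "or", "pa",
  "pr", "ri", "sc", "sd", "tn", "tx", "ut", "vt", "va", "vi",
  "wa", "wv", "wi", "wy", "al", "bc", "mb", "nb", "lb", "nf",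
  "nt", "ns", "nu", "on", "qc", "sk", "yt", "dengl", "fraspm"]

-- the while loop: state (b, list, i); string[b:i] is a Python slice (clamped), taken on the code points
def delimitGoA (cs : List Char) (b : Nat) (list : List String) (i : Nat) : List String :=
  if _h : i ≤ cs.length then
    let sub := String.ofList (PySem.List.slice cs (some (b : Int)) (some (i : Int)))
    if sub ∈ allStates then delimitGoA cs i (list ++ [sub]) (i + 1)
    else delimitGoA cs b list (i + 1)
  else list
termination_by cs.length + 1 - i
decreasing_by all_goals omega

def delimit_str (string : String) : List String :=
  delimitGoA string.toList 0 [] 0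

-- ===== PORT B =====
-- _TWO_LETTER = frozenset(s for s in all_states if len(s) == 2)
def twoLetter : PySem.Set String :=
  PySem.Set.ofList (allStates.filter (fun s => PySem.Str.len s == 2))

-- the while loop: position pointer p, probes lengths 2, 5 ("dengl"), 6 ("fraspm"), breaks when stuck
def delimitGoB (cs : List Char) (p : Nat) (tokens : List String) : List String :=
  if _h : p < cs.length then
    let w := String.ofList (PySem.List.slice cs (some (p : Int)) (some ((p + 2 : Nat) : Int)))
    if w ∈ twoLetter then delimitGoB cs (p + 2) (tokens ++ [w])
    else if String.ofList (PySem.List.slice cs (some (p : Int)) (some ((p + 5 : Nat) : Int))) = "dengl" then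
      delimitGoB cs (p + 5) (tokens ++ ["dengl"])
    else if String.ofList (PySem.List.slice cs (some (p : Int)) (some ((p + 6 : Nat) : Int))) = "fraspm" then
      delimitGoB cs (p + 6) (tokens ++ ["fraspm"])
    else tokens
  else tokens
termination_by cs.length - p
decreasing_by all_goals omega

def delimit_str_alt (string : String) : List String :=
  delimitGoB string.toList 0 []

-- ===== PRECONDITION & SPEC =====
def Spec_delimit_str (string : String) (out : List String) : Prop := out = delimit_str_alt string
instance (string : String) (out : List String) : Decidable (Spec_delimit_str string out) := by unfold Spec_delimit_str; infer_instance

-- ===== CLAIM (what is proved, stated in full; the proofs are below) =====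
def Claim_equal_delimit_str : Prop := ∀ (string : String), Dom_delimit_str string → Spec_delimit_str string (delimit_str string)

-- ===== LEMMAS AND PROOFS =====

-- every state code has length 2, or is "dengl" (length 5) or "fraspm" (length 6)
theorem mem_allStates_length : ∀ s ∈ allStates, s.toList.length = 2 ∨ s = "dengl" ∨ s = "fraspm" := by decide

theorem mem_twoLetter_iff (x : String) : x ∈ twoLetter ↔ x ∈ allStates ∧ x.toList.length = 2 := by
  simp only [twoLetter, PySem.Set.mem_ofList, List.mem_filter, pysem, beq_iff_eq]
  constructor
  · rintro ⟨h1, h2⟩; exact ⟨h1, by omega⟩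
  · rintro ⟨h1, h2⟩; exact ⟨h1, by omega⟩

-- the slices both ports take, on the list side
theorem sliceA (cs : List Char) (b i : Nat) :
    PySem.List.slice cs (some (b : Int)) (some (i : Int)) = (cs.drop b).take (i - b) :=
  PySem.List.slice_natCast cs b i

-- no prefix of cs.drop b of a length other than a code length / code value is a state;
-- hypotheses h2/h5/h6 say the three probes of B all failed at position b (as far as relevant to i)
theorem sub_not_mem (cs : List Char) (b i : Nat) (hb : b < i) (hi : i ≤ cs.length)
    (h2 : i = b + 2 → String.ofList ((cs.drop b).take 2) ∉ twoLetter)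
    (h5 : i = b + 5 → String.ofList ((cs.drop b).take 5) ≠ "dengl")
    (h6 : i = b + 6 → String.ofList ((cs.drop b).take 6) ≠ "fraspm") :
    String.ofList ((cs.drop b).take (i - b)) ∉ allStates := by
  intro hm
  have hlen : (String.ofList ((cs.drop b).take (i - b))).toList.length = i - b := by
    simp; omega
  rcases mem_allStates_length _ hm with h | h | h
  · have hi2 : i = b + 2 := by omega
    subst hi2
    refine h2 rfl ((mem_twoLetter_iff _).2 ⟨?_, ?_⟩)
    · simpa [Nat.add_sub_cancel_left] using hm
    · simpa [Nat.add_sub_cancel_left] using hlen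
  · have : (String.ofList ((cs.drop b).take (i - b))).toList.length = 5 := by rw [h]; decide
    have hi5 : i = b + 5 := by omega
    subst hi5
    exact h5 rfl (by simpa [Nat.add_sub_cancel_left] using h)
  · have : (String.ofList ((cs.drop b).take (i - b))).toList.length = 6 := by rw [h]; decide
    have hi6 : i = b + 6 := by omega
    subst hi6
    exact h6 rfl (by simpa [Nat.add_sub_cancel_left] using h)

-- one step of A's loop when the current slice is not a state
theorem stepA_nomatch (cs : List Char) (b i : Nat) (acc : List String) (h : i ≤ cs.length)
    (hm : String.ofList ((cs.drop b).take (i - b)) ∉ allStates) :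
    delimitGoA cs b acc i = delimitGoA cs b acc (i + 1) := by
  rw [delimitGoA]
  simp only [sliceA, h, dif_pos, hm, if_neg, not_false_iff]

-- one step of A's loop when the current slice IS a state
theorem stepA_match (cs : List Char) (b i : Nat) (acc : List String) (h : i ≤ cs.length)
    (hm : String.ofList ((cs.drop b).take (i - b)) ∈ allStates) :
    delimitGoA cs b acc i =
      delimitGoA cs i (acc ++ [String.ofList ((cs.drop b).take (i - b))]) (i + 1) := by
  rw [delimitGoA]
  simp only [sliceA, h, dif_pos, hm, if_pos]

-- if from index j on no slice string[b:i] ever matches, A's loop returns its accumulator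
theorem runA_nomatch (cs : List Char) (b : Nat) :
    ∀ fuel j acc, cs.length + 1 - j ≤ fuel →
      (∀ i, j ≤ i → i ≤ cs.length → String.ofList ((cs.drop b).take (i - b)) ∉ allStates) →
      delimitGoA cs b acc j = acc := by
  intro fuel
  induction fuel with
  | zero =>
    intro j acc hf _
    rw [delimitGoA]
    simp only [dif_neg (by omega : ¬ j ≤ cs.length)]
  | succ k ih =>
    intro j acc _ hno
    by_cases hj : j ≤ cs.length
    · rw [stepA_nomatch cs b j acc hj (hno j le_rfl hj)]
      exact ih (j + 1) acc (by omega) (fun i hi => hno i (by omega))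
    · rw [delimitGoA]; simp only [dif_neg hj]

-- main invariant: A's scan restarted at base b (next index b+1) computes exactly B's loop from p = b
theorem main_loop (cs : List Char) :
    ∀ fuel b acc, cs.length - b < fuel →
      delimitGoA cs b acc (b + 1) = delimitGoB cs b acc := by
  intro fuel
  induction fuel with
  | zero => intro b acc hf; omega
  | succ k ih =>
    intro b acc hf
    by_cases hbn : b < cs.length
    · -- B's three probes
      set w2 := String.ofList ((cs.drop b).take 2) with hw2
      by_cases hC1 : w2 ∈ twoLetter
      · -- length-2 match
        have hlen2 : w2.toList.length = 2 := ((mem_twoLetter_iff _).1 hC1).2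
        have hb2 : b + 2 ≤ cs.length := by
          have : w2.toList.length = min 2 (cs.length - b) := by simp [hw2]
          omega
        have hmem : w2 ∈ allStates := ((mem_twoLetter_iff _).1 hC1).1
        rw [stepA_nomatch cs b (b + 1) acc (by omega)
              (sub_not_mem cs b (b + 1) (by omega) (by omega)
                (by omega) (by omega) (by omega))]
        rw [show b + 1 + 1 = b + 2 by omega,
            stepA_match cs b (b + 2) acc hb2 (by simpa [Nat.add_sub_cancel_left] using hmem)]
        rw [show b + 2 + 1 = (b + 2) + 1 by omega,
            ih (b + 2) (acc ++ [String.ofList ((cs.drop b).take (b + 2 - b))]) (by omega)]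
        conv_rhs => rw [delimitGoB]
        simp only [dif_pos hbn, sliceA, Nat.add_sub_cancel_left, ← hw2, if_pos hC1]
      · set w5 := String.ofList ((cs.drop b).take 5) with hw5
        by_cases hC2 : w5 = "dengl"
        · -- "dengl" match
          have hb5 : b + 5 ≤ cs.length := by
            have h1 : w5.toList.length = min 5 (cs.length - b) := by simp [hw5]
            have h2 : w5.toList.length = 5 := by rw [hC2]; decide
            omega
          have hnm : ∀ i, b + 1 ≤ i → i ≤ b + 4 → i ≤ cs.length →
              String.ofList ((cs.drop b).take (i - b)) ∉ allStates := by
            intro i h1 h2 h3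
            exact sub_not_mem cs b i (by omega) h3
              (fun h => by simpa [← hw2] using hC1) (by omega) (by omega)
          rw [stepA_nomatch cs b (b + 1) acc (by omega) (hnm _ le_rfl (by omega) (by omega))]
          rw [show b + 1 + 1 = b + 2 by omega,
              stepA_nomatch cs b (b + 2) acc (by omega) (hnm _ (by omega) (by omega) (by omega))]
          rw [show b + 2 + 1 = b + 3 by omega,
              stepA_nomatch cs b (b + 3) acc (by omega) (hnm _ (by omega) (by omega) (by omega))]
          rw [show b + 3 + 1 = b + 4 by omega,
              stepA_nomatch cs b (b + 4) acc (by omega) (hnm _ (by omega) (by omega) (by omega))]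
          have hmem5 : String.ofList ((cs.drop b).take (b + 5 - b)) ∈ allStates := by
            simp only [Nat.add_sub_cancel_left, ← hw5, hC2]; decide
          rw [show b + 4 + 1 = b + 5 by omega,
              stepA_match cs b (b + 5) acc hb5 hmem5]
          rw [ih (b + 5) _ (by omega)]
          conv_rhs => rw [delimitGoB]
          simp only [dif_pos hbn, sliceA, Nat.add_sub_cancel_left, ← hw2, if_neg hC1,
            ← hw5, hC2, if_true]
        · set w6 := String.ofList ((cs.drop b).take 6) with hw6
          by_cases hC3 : w6 = "fraspm"
          · -- "fraspm" match
            have hb6 : b + 6 ≤ cs.length := by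
              have h1 : w6.toList.length = min 6 (cs.length - b) := by simp [hw6]
              have h2 : w6.toList.length = 6 := by rw [hC3]; decide
              omega
            have hnm : ∀ i, b + 1 ≤ i → i ≤ b + 5 → i ≤ cs.length →
                String.ofList ((cs.drop b).take (i - b)) ∉ allStates := by
              intro i h1 h2 h3
              exact sub_not_mem cs b i (by omega) h3
                (fun h => by simpa [← hw2] using hC1)
                (fun h => by simpa [← hw5] using hC2) (by omega)
            rw [stepA_nomatch cs b (b + 1) acc (by omega) (hnm _ le_rfl (by omega) (by omega))]
            rw [show b + 1 + 1 = b + 2 by omega,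
                stepA_nomatch cs b (b + 2) acc (by omega) (hnm _ (by omega) (by omega) (by omega))]
            rw [show b + 2 + 1 = b + 3 by omega,
                stepA_nomatch cs b (b + 3) acc (by omega) (hnm _ (by omega) (by omega) (by omega))]
            rw [show b + 3 + 1 = b + 4 by omega,
                stepA_nomatch cs b (b + 4) acc (by omega) (hnm _ (by omega) (by omega) (by omega))]
            rw [show b + 4 + 1 = b + 5 by omega,
                stepA_nomatch cs b (b + 5) acc (by omega) (hnm _ (by omega) (by omega) (by omega))]
            have hmem6 : String.ofList ((cs.drop b).take (b + 6 - b)) ∈ allStates := by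
              simp only [Nat.add_sub_cancel_left, ← hw6, hC3]; decide
            rw [show b + 5 + 1 = b + 6 by omega,
                stepA_match cs b (b + 6) acc hb6 hmem6]
            rw [ih (b + 6) _ (by omega)]
            conv_rhs => rw [delimitGoB]
            simp only [dif_pos hbn, sliceA, Nat.add_sub_cancel_left, ← hw2, if_neg hC1,
              ← hw5, if_neg hC2, ← hw6, hC3, if_true]
          · -- stuck: A never matches again, B breaks
            rw [runA_nomatch cs b (cs.length + 1 - (b + 1)) (b + 1) acc le_rfl ?_]
            · rw [delimitGoB]
              simp only [dif_pos hbn, sliceA, Nat.add_sub_cancel_left, ← hw2, if_neg hC1,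
                ← hw5, if_neg hC2, ← hw6, if_neg hC3]
            · intro i h1 h2
              exact sub_not_mem cs b i (by omega) h2
                (fun h => by simpa [← hw2] using hC1)
                (fun h => by simpa [← hw5] using hC2)
                (fun h => by simpa [← hw6] using hC3)
    · -- b ≥ length: A's guard b+1 ≤ length fails, B's guard p < length fails
      rw [delimitGoA, delimitGoB]
      simp only [dif_neg (by omega : ¬ b + 1 ≤ cs.length), dif_neg hbn]

-- ===== VERDICT (by name: the statement is the Claim_ definition above) =====
theorem delimit_str_spec : Claim_equal_delimit_str := by
  intro s _
  show delimit_str s = delimit_str_alt s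
  unfold delimit_str delimit_str_alt
  rw [stepA_nomatch s.toList 0 0 [] (by omega) (by simp; decide),
      main_loop s.toList (s.toList.length + 1) 0 [] (by omega)]
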